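-- pv_equiv track=rewrite | github.com/Hayford08/advent-of-code | 2023/Day14/day14.py | calculate
-- ===== SOURCE A (Python) =====
-- def calculate(grid):
-- 	ans = 0
-- 	for i, row in enumerate(grid):
-- 		cnt = 0
-- 		for ch in row:
-- 			if ch == "O":
-- 				cnt += 1
-- 		ans += (len(grid) - i) * cnt
-- 	return ans
-- ===== SOURCE B (Python) =====
-- def calculate(grid):
-- 	ans = 0
-- 	seen = 0
-- 	for row in grid:
-- 		for ch in row:
-- 			if ch == "O":
-- 				seen += 1
-- 		ans += seen
-- 	return ans
-- ===== Notes on version B (the rewrite author's own statement) =====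
-- stated objective: simpler
-- what changed: Replaces the index-weighted sum (len(grid)-i)*cnt_i, which needs enumerate and len(grid), with a running prefix count of 'O's added once per row (identity sum_i (n-i)*cnt_i = sum of prefix counts).
import Mathlib
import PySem

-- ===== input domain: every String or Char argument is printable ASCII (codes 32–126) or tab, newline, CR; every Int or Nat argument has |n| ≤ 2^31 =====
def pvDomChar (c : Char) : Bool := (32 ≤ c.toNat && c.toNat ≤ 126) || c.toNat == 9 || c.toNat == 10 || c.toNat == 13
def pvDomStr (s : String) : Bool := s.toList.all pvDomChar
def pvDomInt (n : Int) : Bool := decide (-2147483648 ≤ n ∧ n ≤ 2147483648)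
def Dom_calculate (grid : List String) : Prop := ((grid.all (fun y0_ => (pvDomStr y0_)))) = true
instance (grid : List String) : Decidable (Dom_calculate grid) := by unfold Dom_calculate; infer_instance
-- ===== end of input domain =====

-- B replaces the index-weighted sum (len(grid)-i)*cnt with a running prefix count of 'O's added once per row (simpler decomposition, same cost).


-- ===== PORT A =====
def calculate (grid : List String) : Int :=
  (PySem.List.enumerate grid).foldl
    (fun ans p =>
      let cnt : Int := p.2.toList.foldl (fun c ch => if ch == 'O' then c + 1 else c) 0
      ans + ((grid.length : Int) - p.1) * cnt) 0

-- ===== PORT B =====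
def calculate_alt (grid : List String) : Int :=
  (grid.foldl
    (fun (q : Int × Int) row =>
      let seen : Int := row.toList.foldl (fun s ch => if ch == 'O' then s + 1 else s) q.2
      (q.1 + seen, seen)) (0, 0)).1

-- ===== PRECONDITION & SPEC =====
def Spec_calculate (grid : List String) (out : Int) : Prop := out = calculate_alt grid
instance (grid : List String) (out : Int) : Decidable (Spec_calculate grid out) := by unfold Spec_calculate; infer_instance

-- ===== CLAIM (what is proved, stated in full; the proofs are below) =====
def Claim_equal_calculate : Prop := ∀ (grid : List String), Dom_calculate grid → Spec_calculate grid (calculate grid)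

-- ===== LEMMAS AND PROOFS =====

theorem calculate_key (grid : List String) : ∀ (n s ans a seen : Int),
    n = s + (grid.length : Int) → ans = a + (grid.length : Int) * seen →
    (PySem.List.enumerate grid s).foldl
      (fun ans p =>
        let cnt : Int := p.2.toList.foldl (fun c ch => if ch == 'O' then c + 1 else c) 0
        ans + (n - p.1) * cnt) ans
    = (grid.foldl
        (fun (q : Int × Int) row =>
          let seen : Int := row.toList.foldl (fun s ch => if ch == 'O' then s + 1 else s) q.2
          (q.1 + seen, seen)) (a, seen)).1 := by
  induction grid with
  | nil =>
    intro n s ans a seen hn hA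
    simp [PySem.List.enumerate_nil] at hA ⊢
    omega
  | cons row rest ih =>
    intro n s ans a seen hn hA
    rw [PySem.List.enumerate_cons, List.foldl_cons, List.foldl_cons]
    have h1 : n = (s + 1) + (rest.length : Int) := by
      simp only [List.length_cons] at hn; push_cast at hn; omega
    have h2 : ans + (n - s) * (row.toList.foldl (fun c ch => if ch == 'O' then c + 1 else c) (0 : Int))
        = (a + (row.toList.foldl (fun s ch => if ch == 'O' then s + 1 else s) seen))
          + (rest.length : Int) * (row.toList.foldl (fun s ch => if ch == 'O' then s + 1 else s) seen) := by
      simp only [PySem.List.foldl_beq_add_one]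
      subst hn hA
      simp only [List.length_cons]
      push_cast
      ring
    exact h2 ▸ ih n (s + 1)
      (ans + (n - s) * (row.toList.foldl (fun c ch => if ch == 'O' then c + 1 else c) (0 : Int)))
      (a + (row.toList.foldl (fun s ch => if ch == 'O' then s + 1 else s) seen))
      (row.toList.foldl (fun s ch => if ch == 'O' then s + 1 else s) seen) h1 h2

theorem calculate_spec : Claim_equal_calculate := by
  unfold Claim_equal_calculate Spec_calculate calculate calculate_alt
  intro grid _
  exact calculate_key grid _ 0 0 0 0 (by simp) (by simp)
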